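-- pv_equiv track=rewrite | github.com/ailyanlu1/Contests | CCC Python/ccc11s3_alice_through_the_looking_glass/CCC11S3.py | solve
-- ===== SOURCE A (Python) =====
-- base = ((1, 0), (2, 0), (2, 1), (3, 0))
--
-- layer = ((1, 1), (2, 2), (3, 1))
--
-- def solve(m, x, y):
--     cur = (x // m, y // m)
--     if cur in base:
--         return True
--     elif m >= 5 and cur in layer:
--         return solve(m // 5, x % m, y % m)
--     else:
--         return False
-- ===== SOURCE B (Python) =====
-- base = ((1, 0), (2, 0), (2, 1), (3, 0))
--
-- layer = ((1, 1), (2, 2), (3, 1))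
--
-- def solve(m, x, y):
--     # Phase 1: materialize the whole chain of quotient pairs down the scales.
--     curs = []
--     while True:
--         curs.append((x // m, y // m))
--         if m < 5:
--             break
--         x, y, m = x % m, y % m, m // 5
--     # Phase 2: scan the chain.
--     for cur in curs:
--         if cur in base:
--             return True
--         if cur not in layer:
--             return False
--     return False
-- ===== Notes on version B (the rewrite author's own statement) =====
-- stated objective: alternative
-- what changed: Replaces A's fused recursion by a two-phase program: a loop first materializes the whole chain of quotient pairs (x//m, y//m) down the scales, then a separate scan of that list decides membership.
-- outside the precondition, e.g. on solve(0, 1, 1): A raises ZeroDivisionError, B raises ZeroDivisionError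
import Mathlib
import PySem

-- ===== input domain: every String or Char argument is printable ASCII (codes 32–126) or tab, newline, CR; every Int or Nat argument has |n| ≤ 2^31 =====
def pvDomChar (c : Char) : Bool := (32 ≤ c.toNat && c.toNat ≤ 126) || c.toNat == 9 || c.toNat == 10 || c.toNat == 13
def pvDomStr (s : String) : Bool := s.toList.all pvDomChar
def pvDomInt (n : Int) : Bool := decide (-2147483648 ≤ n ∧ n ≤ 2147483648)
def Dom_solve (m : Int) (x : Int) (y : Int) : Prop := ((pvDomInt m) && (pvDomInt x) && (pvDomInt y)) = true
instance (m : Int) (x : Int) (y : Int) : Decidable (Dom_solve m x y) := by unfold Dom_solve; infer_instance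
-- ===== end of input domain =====

-- B materializes the whole chain of quotient pairs first and then scans it (two phases),
-- instead of A's fused recursion; same outputs, same O(log m) cost (objective: alternative).

-- termination helper for both ports: with m ≥ 5, m // 5 strictly shrinks (cited in decreasing_by)
theorem pv_fdiv5_lt (m : Int) (h : 5 ≤ m) : (PySem.Int.floordiv m 5).toNat < m.toNat := by
  rw [PySem.Int.floordiv_eq_ediv_of_pos (by omega : (0:Int) < 5)]
  have h1 : 0 ≤ m / 5 := Int.ediv_nonneg (by omega) (by omega)
  have h2 : m / 5 < m := by apply Int.ediv_lt_of_lt_mul (by omega); omega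
  omega

-- ===== PORT A =====
def pyBase : List (Int × Int) := [(1, 0), (2, 0), (2, 1), (3, 0)]
def pyLayer : List (Int × Int) := [(1, 1), (2, 2), (3, 1)]

def solve (m : Int) (x : Int) (y : Int) : Bool :=
  let cur : Int × Int := (PySem.Int.floordiv x m, PySem.Int.floordiv y m)
  if cur ∈ pyBase then true
  else if 5 ≤ m ∧ cur ∈ pyLayer then
    solve (PySem.Int.floordiv m 5) (PySem.Int.mod x m) (PySem.Int.mod y m)
  else false
termination_by m.toNat
decreasing_by exact pv_fdiv5_lt m (by omega)

-- ===== PORT B =====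
-- phase 1 of Source B: the while-loop that appends (x//m, y//m) and rescales until m < 5
def chain (m : Int) (x : Int) (y : Int) : List (Int × Int) :=
  let cur : Int × Int := (PySem.Int.floordiv x m, PySem.Int.floordiv y m)
  if 5 ≤ m then
    cur :: chain (PySem.Int.floordiv m 5) (PySem.Int.mod x m) (PySem.Int.mod y m)
  else [cur]
termination_by m.toNat
decreasing_by exact pv_fdiv5_lt m (by omega)

-- phase 2 of Source B: the for-loop scanning the materialized chain
def scanChain : List (Int × Int) → Bool
  | [] => false
  | c :: rest =>
    if c ∈ pyBase then true
    else if c ∈ pyLayer then scanChain rest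
    else false

def solve_alt (m : Int) (x : Int) (y : Int) : Bool := scanChain (chain m x y)

-- ===== PRECONDITION & SPEC =====
-- Pre_ excludes exactly m = 0, where Python A raises ZeroDivisionError on x // m.
def Pre_solve (m : Int) (x : Int) (y : Int) : Prop := m ≠ 0
instance (m : Int) (x : Int) (y : Int) : Decidable (Pre_solve m x y) := by unfold Pre_solve; infer_instance
def pvWitness_solve : Int × Int × Int := (125, 300, 70)

def Spec_solve (m : Int) (x : Int) (y : Int) (out : Bool) : Prop := out = solve_alt m x y
instance (m : Int) (x : Int) (y : Int) (out : Bool) : Decidable (Spec_solve m x y out) := by unfold Spec_solve; infer_instance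

-- ===== CLAIM (what is proved, stated in full; the proofs are below) =====
def Claim_equal_solve : Prop := ∀ (m : Int) (x : Int) (y : Int), Dom_solve m x y → Pre_solve m x y → Spec_solve m x y (solve m x y)

-- ===== LEMMAS AND PROOFS =====

theorem solve_eq_scan_chain (n : Nat) (m x y : Int) (hn : m.toNat = n) :
    solve m x y = scanChain (chain m x y) := by
  induction n using Nat.strong_induction_on generalizing m x y with
  | _ n ih =>
    rw [solve, chain]
    by_cases h5 : 5 ≤ m
    · simp only [if_pos h5, scanChain]
      by_cases hb : (PySem.Int.floordiv x m, PySem.Int.floordiv y m) ∈ pyBase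
      · simp [hb]
      · by_cases hl : (PySem.Int.floordiv x m, PySem.Int.floordiv y m) ∈ pyLayer
        · simp only [if_neg hb, if_pos (And.intro h5 hl), if_pos hl]
          exact ih _ (hn ▸ pv_fdiv5_lt m h5) _ _ _ rfl
        · simp [hb, hl]
    · simp only [if_neg h5, scanChain]
      by_cases hb : (PySem.Int.floordiv x m, PySem.Int.floordiv y m) ∈ pyBase
      · simp [hb]
      · simp only [if_neg hb]
        have : ¬ (5 ≤ m ∧ (PySem.Int.floordiv x m, PySem.Int.floordiv y m) ∈ pyLayer) := by
          intro h; exact h5 h.1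
        simp only [if_neg this]
        split <;> simp

-- ===== VERDICT (by name: the statement is the Claim_ definition above) =====
theorem solve_spec : Claim_equal_solve := by
  intro m x y _ _
  unfold Spec_solve solve_alt
  exact solve_eq_scan_chain m.toNat m x y rfl
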